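-- pv_equiv track=rewrite | github.com/island255/Binary-Decomposition-Under-FCG-Variance | 4.construct_function_mapping/three_types_of_mappings/construct_three_types_of_mapping.py | analyze_mapping_statistics
-- ===== SOURCE A (Python) =====
-- def analyze_mapping_statistics(project_binary_name, binary_name_to_mappings, b2b_type_results_folder):
--     """分析映射统计信息，为每种比较类型创建任务"""
--
--     cmd_list = []
--
--     # 收集所有架构、编译器和选项的组合
--     all_groups = []
--     for arch in binary_name_to_mappings:
--         for compiler in binary_name_to_mappings[arch]:
--             for opt in binary_name_to_mappings[arch][compiler]:
--                 all_groups.append((arch, compiler, opt))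
--
--     # 1. 跨优化选项比较 (相同架构和编译器，不同选项)
--     for group1 in all_groups:
--         arch1, compiler1, opt1 = group1
--         for group2 in all_groups:
--             arch2, compiler2, opt2 = group2
--             if arch1 == arch2 and compiler1 == compiler2 and opt1 != opt2:
--                 mapping_file1 = binary_name_to_mappings[arch1][compiler1][opt1][0]
--                 mapping_file2 = binary_name_to_mappings[arch2][compiler2][opt2][0]
--                 cmd = (project_binary_name, "cross_opt", group1, group2,
--                        mapping_file1, mapping_file2, b2b_type_results_folder)
--                 cmd_list.append(cmd)
--
--     # 2. 跨编译器比较 (相同架构和选项，不同编译器)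
--     for group1 in all_groups:
--         arch1, compiler1, opt1 = group1
--         for group2 in all_groups:
--             arch2, compiler2, opt2 = group2
--             if arch1 == arch2 and compiler1 != compiler2 and opt1 == opt2:
--                 mapping_file1 = binary_name_to_mappings[arch1][compiler1][opt1][0]
--                 mapping_file2 = binary_name_to_mappings[arch2][compiler2][opt2][0]
--                 cmd = (project_binary_name, "cross_compiler", group1, group2,
--                        mapping_file1, mapping_file2, b2b_type_results_folder)
--                 cmd_list.append(cmd)
--
--     # 3. 跨架构比较 (相同编译器和选项，不同架构)
--     for group1 in all_groups:
--         arch1, compiler1, opt1 = group1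
--         for group2 in all_groups:
--             arch2, compiler2, opt2 = group2
--             if arch1 != arch2 and compiler1 == compiler2 and opt1 == opt2:
--                 mapping_file1 = binary_name_to_mappings[arch1][compiler1][opt1][0]
--                 mapping_file2 = binary_name_to_mappings[arch2][compiler2][opt2][0]
--                 cmd = (project_binary_name, "cross_arch", group1, group2,
--                        mapping_file1, mapping_file2, b2b_type_results_folder)
--                 cmd_list.append(cmd)
--
--     return cmd_list
-- ===== SOURCE B (Python) =====
-- def analyze_mapping_statistics(project_binary_name, binary_name_to_mappings, b2b_type_results_folder):
--     # Bucket groups by each pair of fixed attributes once, then emit pairs per bucket: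
--     # O(n + output) instead of A's three O(n^2) scans; identical output order.
--     groups = [(a, c, o)
--               for a, cm in binary_name_to_mappings.items()
--               for c, om in cm.items()
--               for o in om]
--     by_ac, by_ao, by_co = {}, {}, {}
--     for g in groups:
--         a, c, o = g
--         by_ac.setdefault((a, c), []).append(g)
--         by_ao.setdefault((a, o), []).append(g)
--         by_co.setdefault((c, o), []).append(g)
--
--     def cmd(tag, g1, g2):
--         a1, c1, o1 = g1
--         a2, c2, o2 = g2
--         return (project_binary_name, tag, g1, g2,
--                 binary_name_to_mappings[a1][c1][o1][0],
--                 binary_name_to_mappings[a2][c2][o2][0],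
--                 b2b_type_results_folder)
--
--     cmds = []
--     for g in groups:
--         a, c, o = g
--         cmds.extend(cmd("cross_opt", g, g2) for g2 in by_ac[(a, c)] if g2[2] != o)
--     for g in groups:
--         a, c, o = g
--         cmds.extend(cmd("cross_compiler", g, g2) for g2 in by_ao[(a, o)] if g2[1] != c)
--     for g in groups:
--         a, c, o = g
--         cmds.extend(cmd("cross_arch", g, g2) for g2 in by_co[(c, o)] if g2[0] != a)
--     return cmds
-- ===== Notes on version B (the rewrite author's own statement) =====
-- stated objective: faster
-- what changed: Instead of three O(n^2) all-pairs scans with a three-way filter, B flattens the groups once, buckets them into three dicts keyed by the two fixed attributes ((arch,compiler), (arch,opt), (compiler,opt)), and emits each group's partners straight from its bucket, giving O(n + output) time with identical output order.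
import Mathlib
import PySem

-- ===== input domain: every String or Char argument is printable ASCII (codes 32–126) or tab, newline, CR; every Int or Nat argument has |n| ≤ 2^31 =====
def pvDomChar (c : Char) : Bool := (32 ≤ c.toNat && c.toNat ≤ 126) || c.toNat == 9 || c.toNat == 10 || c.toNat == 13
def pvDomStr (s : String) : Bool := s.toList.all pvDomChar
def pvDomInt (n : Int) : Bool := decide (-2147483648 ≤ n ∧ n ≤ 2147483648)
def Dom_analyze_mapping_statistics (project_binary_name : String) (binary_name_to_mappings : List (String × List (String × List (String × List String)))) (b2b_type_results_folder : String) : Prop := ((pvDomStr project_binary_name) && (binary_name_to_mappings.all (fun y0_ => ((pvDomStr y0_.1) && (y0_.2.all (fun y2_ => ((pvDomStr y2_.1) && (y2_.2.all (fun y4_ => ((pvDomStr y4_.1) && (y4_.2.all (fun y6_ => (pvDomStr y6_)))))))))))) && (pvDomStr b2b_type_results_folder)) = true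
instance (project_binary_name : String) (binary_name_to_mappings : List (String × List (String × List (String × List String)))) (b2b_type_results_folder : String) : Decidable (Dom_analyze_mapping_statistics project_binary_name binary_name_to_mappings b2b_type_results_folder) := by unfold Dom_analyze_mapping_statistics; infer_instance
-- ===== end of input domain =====

-- ===== PORT A =====
-- B buckets the flattened groups by their two fixed attributes and reads each group's partners off
-- its bucket (one pass + bucket traversal) instead of A's three all-pairs scans; same output order.

-- A-side helper: binary_name_to_mappings[a][c][o][0] — first-match dict lookups and list indexing
-- with a default; exact wherever Python A returns (Pre_ excludes the KeyError/IndexError inputs).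
def pvLookA (m : List (String × List (String × List (String × List String)))) (a c o : String) : String :=
  PySem.List.pyGetD ((PySem.Dict.mk ((PySem.Dict.mk ((PySem.Dict.mk m).getD a [])).getD c [])).getD o []) 0 ""

-- A-side helper: the cmd tuple A appends
def pvCmdA (pbn : String) (m : List (String × List (String × List (String × List String)))) (folder tag : String) (g1 g2 : String × String × String) : String × String × (String × String × String) × (String × String × String) × String × String × String :=
  (pbn, tag, g1, g2, pvLookA m g1.1 g1.2.1 g1.2.2, pvLookA m g2.1 g2.2.1 g2.2.2, folder)

-- A's all_groups: nested dict iteration (keys with their values, in insertion order) appending (arch, compiler, opt)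
def pvGroupsA (m : List (String × List (String × List (String × List String)))) : List (String × String × String) :=
  m.foldl (fun acc p => p.2.foldl (fun acc q => q.2.foldl (fun acc r => acc ++ [(p.1, q.1, r.1)]) acc) acc) []

def analyze_mapping_statistics (project_binary_name : String) (binary_name_to_mappings : List (String × List (String × List (String × List String)))) (b2b_type_results_folder : String) : List (String × String × (String × String × String) × (String × String × String) × String × String × String) :=
  let all_groups := pvGroupsA binary_name_to_mappings
  let cmd_list := all_groups.foldl (fun acc g1 => all_groups.foldl (fun acc g2 =>
      if g1.1 == g2.1 && g1.2.1 == g2.2.1 && !(g1.2.2 == g2.2.2)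
      then acc ++ [pvCmdA project_binary_name binary_name_to_mappings b2b_type_results_folder "cross_opt" g1 g2] else acc) acc) []
  let cmd_list := all_groups.foldl (fun acc g1 => all_groups.foldl (fun acc g2 =>
      if g1.1 == g2.1 && !(g1.2.1 == g2.2.1) && g1.2.2 == g2.2.2
      then acc ++ [pvCmdA project_binary_name binary_name_to_mappings b2b_type_results_folder "cross_compiler" g1 g2] else acc) acc) cmd_list
  all_groups.foldl (fun acc g1 => all_groups.foldl (fun acc g2 =>
      if !(g1.1 == g2.1) && g1.2.1 == g2.2.1 && g1.2.2 == g2.2.2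
      then acc ++ [pvCmdA project_binary_name binary_name_to_mappings b2b_type_results_folder "cross_arch" g1 g2] else acc) acc) cmd_list

-- ===== PORT B =====
-- B-side helper: the same Python lookup expression binary_name_to_mappings[a][c][o][0]
def pvLookB (m : List (String × List (String × List (String × List String)))) (a c o : String) : String :=
  PySem.List.pyGetD ((PySem.Dict.mk ((PySem.Dict.mk ((PySem.Dict.mk m).getD a [])).getD c [])).getD o []) 0 ""

-- B-side helper: Source B's cmd(tag, g1, g2)
def pvCmdB (pbn : String) (m : List (String × List (String × List (String × List String)))) (folder tag : String) (g1 g2 : String × String × String) : String × String × (String × String × String) × (String × String × String) × String × String × String :=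
  (pbn, tag, g1, g2, pvLookB m g1.1 g1.2.1 g1.2.2, pvLookB m g2.1 g2.2.1 g2.2.2, folder)

-- Source B's groups comprehension
def pvGroupsB (m : List (String × List (String × List (String × List String)))) : List (String × String × String) :=
  m.flatMap (fun p => p.2.flatMap (fun q => q.2.map (fun r => (p.1, q.1, r.1))))

-- Source B's bucketing loop: d.setdefault(key(g), []).append(g) over all groups
def pvBucket (gs : List (String × String × String)) (key : (String × String × String) → String × String) : PySem.Dict (String × String) (List (String × String × String)) :=
  gs.foldl (fun d g => d.modify (key g) [] (· ++ [g])) PySem.Dict.empty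

def analyze_mapping_statistics_alt (project_binary_name : String) (binary_name_to_mappings : List (String × List (String × List (String × List String)))) (b2b_type_results_folder : String) : List (String × String × (String × String × String) × (String × String × String) × String × String × String) :=
  let gs := pvGroupsB binary_name_to_mappings
  let byAC := pvBucket gs (fun g => (g.1, g.2.1))
  let byAO := pvBucket gs (fun g => (g.1, g.2.2))
  let byCO := pvBucket gs (fun g => (g.2.1, g.2.2))
  let cmds := gs.foldl (fun acc g => acc ++ ((byAC.getD (g.1, g.2.1) []).filter (fun h => !(h.2.2 == g.2.2))).map (fun h => pvCmdB project_binary_name binary_name_to_mappings b2b_type_results_folder "cross_opt" g h)) []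
  let cmds := gs.foldl (fun acc g => acc ++ ((byAO.getD (g.1, g.2.2) []).filter (fun h => !(h.2.1 == g.2.1))).map (fun h => pvCmdB project_binary_name binary_name_to_mappings b2b_type_results_folder "cross_compiler" g h)) cmds
  gs.foldl (fun acc g => acc ++ ((byCO.getD (g.2.1, g.2.2) []).filter (fun h => !(h.1 == g.1))).map (fun h => pvCmdB project_binary_name binary_name_to_mappings b2b_type_results_folder "cross_arch" g h)) cmds

-- ===== PRECONDITION & SPEC =====
-- Pre_-side flatten of the groups together with their mapping lists
def pvPreGroups (m : List (String × List (String × List (String × List String)))) : List (String × String × String × List String) :=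
  m.flatMap (fun p => p.2.flatMap (fun q => q.2.map (fun r => (p.1, q.1, r.1, r.2))))

-- group g is compared with some group sharing exactly two of the three attributes
def pvNeedsFile (g : String × String × String × List String) (gs : List (String × String × String × List String)) : Bool :=
  gs.any (fun h =>
    (h.1 == g.1 && h.2.1 == g.2.1 && !(h.2.2.1 == g.2.2.1)) ||
    (h.1 == g.1 && !(h.2.1 == g.2.1) && h.2.2.1 == g.2.2.1) ||
    (!(h.1 == g.1) && h.2.1 == g.2.1 && h.2.2.1 == g.2.2.1))

-- Pre_ excludes (i) association lists with duplicate keys at some level, which cannot arise from a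
-- Python dict (the assoc-list encoding of a dict has unique keys at every level), and (ii) inputs on
-- which some group that participates in a comparison has an empty mapping list — there Python A
-- raises IndexError on [0] (and Python B raises the same way).
def Pre_analyze_mapping_statistics (project_binary_name : String) (binary_name_to_mappings : List (String × List (String × List (String × List String)))) (b2b_type_results_folder : String) : Prop :=
  ((binary_name_to_mappings.map Prod.fst).Nodup ∧
    ∀ p ∈ binary_name_to_mappings, (p.2.map Prod.fst).Nodup ∧ ∀ q ∈ p.2, (q.2.map Prod.fst).Nodup) ∧
  (∀ g ∈ pvPreGroups binary_name_to_mappings,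
    pvNeedsFile g (pvPreGroups binary_name_to_mappings) = true → g.2.2.2 ≠ [])
instance (project_binary_name : String) (binary_name_to_mappings : List (String × List (String × List (String × List String)))) (b2b_type_results_folder : String) : Decidable (Pre_analyze_mapping_statistics project_binary_name binary_name_to_mappings b2b_type_results_folder) := by unfold Pre_analyze_mapping_statistics; infer_instance

def pvWitness_analyze_mapping_statistics : String × (List (String × List (String × List (String × List String)))) × String :=
  ("p", [("x86", [("gcc", [("O0", ["f0"]), ("O1", ["f1"])])])], "out")

-- hand-assembled DecidableEq for the 7-tuple list (instance search exceeds its default size limit here)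
def pvDecEqCmd : DecidableEq (String × String × (String × String × String) × (String × String × String) × String × String × String) :=
  let s : DecidableEq String := inferInstance
  let p3 : DecidableEq (String × String × String) := inferInstance
  @instDecidableEqProd _ _ s (@instDecidableEqProd _ _ s (@instDecidableEqProd _ _ p3 (@instDecidableEqProd _ _ p3 (@instDecidableEqProd _ _ s (@instDecidableEqProd _ _ s s)))))
def pvDecEqCmdList : DecidableEq (List (String × String × (String × String × String) × (String × String × String) × String × String × String)) :=
  @instDecidableEqList _ pvDecEqCmd

def Spec_analyze_mapping_statistics (project_binary_name : String) (binary_name_to_mappings : List (String × List (String × List (String × List String)))) (b2b_type_results_folder : String) (out : List (String × String × (String × String × String) × (String × String × String) × String × String × String)) : Prop := out = analyze_mapping_statistics_alt project_binary_name binary_name_to_mappings b2b_type_results_folder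
instance (project_binary_name : String) (binary_name_to_mappings : List (String × List (String × List (String × List String)))) (b2b_type_results_folder : String) (out : List (String × String × (String × String × String) × (String × String × String) × String × String × String)) : Decidable (Spec_analyze_mapping_statistics project_binary_name binary_name_to_mappings b2b_type_results_folder out) := by unfold Spec_analyze_mapping_statistics; exact pvDecEqCmdList out _

-- ===== CLAIM (what is proved, stated in full; the proofs are below) =====
def Claim_equal_analyze_mapping_statistics : Prop := ∀ (project_binary_name : String) (binary_name_to_mappings : List (String × List (String × List (String × List String)))) (b2b_type_results_folder : String), Dom_analyze_mapping_statistics project_binary_name binary_name_to_mappings b2b_type_results_folder → Pre_analyze_mapping_statistics project_binary_name binary_name_to_mappings b2b_type_results_folder → Spec_analyze_mapping_statistics project_binary_name binary_name_to_mappings b2b_type_results_folder (analyze_mapping_statistics project_binary_name binary_name_to_mappings b2b_type_results_folder)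

-- ===== LEMMAS AND PROOFS =====

-- A's triple append-loop over the dict levels builds the same group list as B's comprehension
theorem pvGroupsA_eq (m : List (String × List (String × List (String × List String)))) :
    pvGroupsA m = pvGroupsB m := by
  unfold pvGroupsA pvGroupsB
  have inner : ∀ (a c : String) (rs : List (String × List String)) (acc : List (String × String × String)),
      rs.foldl (fun acc r => acc ++ [(a, c, r.1)]) acc = acc ++ rs.map (fun r => (a, c, r.1)) :=
    fun a c rs acc => PySem.List.foldl_append_singleton_eq_map _ rs acc
  have mid : ∀ (a : String) (cs : List (String × List (String × List String))) (acc : List (String × String × String)),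
      cs.foldl (fun acc q => q.2.foldl (fun acc r => acc ++ [(a, q.1, r.1)]) acc) acc
        = acc ++ cs.flatMap (fun q => q.2.map (fun r => (a, q.1, r.1))) := by
    intro a cs acc
    rw [PySem.List.foldl_congr_mem cs _ (fun acc q => acc ++ q.2.map (fun r => (a, q.1, r.1))) acc
        (fun acc q _ => inner a q.1 q.2 acc), PySem.List.foldl_append_eq_flatMap]
  rw [PySem.List.foldl_congr_mem m _ (fun acc p => acc ++ p.2.flatMap (fun q => q.2.map (fun r => (p.1, q.1, r.1)))) []
      (fun acc p _ => mid p.1 p.2 acc), PySem.List.foldl_append_eq_flatMap]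
  simp

-- a bucket holds exactly the groups with that key, in input order
theorem pvBucket_getD (gs : List (String × String × String)) (key : (String × String × String) → String × String) (k : String × String) :
    (pvBucket gs key).getD k [] = gs.filter (fun g => key g == k) := by
  unfold pvBucket
  have hmap : gs.foldl (fun d g => d.modify (key g) [] (· ++ [g])) PySem.Dict.empty
      = (gs.map (fun g => (key g, g))).foldl (fun d p => d.modify p.1 [] (· ++ [p.2])) PySem.Dict.empty := by
    rw [List.foldl_map]
  rw [hmap, PySem.Dict.getD_foldl_modify_append, List.filter_map]
  simp [Function.comp_def]

-- one of A's quadratic passes, as a flatMap of filtered partner lists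
theorem pvPassA {G O : Type} (gs : List G) (cond : G → G → Bool) (cmd : G → G → O) (acc : List O) :
    gs.foldl (fun acc g1 => gs.foldl (fun acc g2 => if cond g1 g2 then acc ++ [cmd g1 g2] else acc) acc) acc
      = acc ++ gs.flatMap (fun g1 => (gs.filter (cond g1)).map (cmd g1)) := by
  rw [PySem.List.foldl_congr_mem gs _ (fun acc g1 => acc ++ (gs.filter (cond g1)).map (cmd g1)) acc
      (fun acc g1 _ => PySem.List.foldl_append_if (cond g1) (cmd g1) gs acc),
    PySem.List.foldl_append_eq_flatMap]

theorem pvCondOpt (x1 x2 x3 y1 y2 y3 : String) :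
    (!(x3 == y3) && ((x1, x2) == (y1, y2))) = (y1 == x1 && y2 == x2 && !(y3 == x3)) := by
  cases h1 : (y1 == x1) <;> cases h2 : (y2 == x2) <;> cases h3 : (y3 == x3) <;>
    simp_all [BEq.beq, eq_comm]

theorem pvCondCompiler (x1 x2 x3 y1 y2 y3 : String) :
    (!(x2 == y2) && ((x1, x3) == (y1, y3))) = (y1 == x1 && !(y2 == x2) && y3 == x3) := by
  cases h1 : (y1 == x1) <;> cases h2 : (y2 == x2) <;> cases h3 : (y3 == x3) <;>
    simp_all [BEq.beq, eq_comm]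

theorem pvCondArch (x1 x2 x3 y1 y2 y3 : String) :
    (!(x1 == y1) && ((x2, x3) == (y2, y3))) = (!(y1 == x1) && y2 == x2 && y3 == x3) := by
  cases h1 : (y1 == x1) <;> cases h2 : (y2 == x2) <;> cases h3 : (y3 == x3) <;>
    simp_all [BEq.beq, eq_comm]

-- ===== VERDICT (by name: the statement is the Claim_ definition above) =====
theorem analyze_mapping_statistics_spec : Claim_equal_analyze_mapping_statistics := by
  intro pbn m folder _ _
  unfold Spec_analyze_mapping_statistics analyze_mapping_statistics analyze_mapping_statistics_alt
  rw [pvGroupsA_eq]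
  rw [pvPassA, pvPassA, pvPassA,
      PySem.List.foldl_append_eq_flatMap, PySem.List.foldl_append_eq_flatMap, PySem.List.foldl_append_eq_flatMap]
  congr 1
  · congr 1
    · congr 1
      congr 1
      funext g1
      rw [pvBucket_getD, List.filter_filter,
          List.filter_congr (fun h _ => (pvCondOpt h.1 h.2.1 h.2.2 g1.1 g1.2.1 g1.2.2).symm)]
      exact List.map_congr_left (fun h _ => by simp [pvCmdA, pvCmdB, pvLookA, pvLookB])
    · congr 1
      funext g1
      rw [pvBucket_getD, List.filter_filter,
          List.filter_congr (fun h _ => (pvCondCompiler h.1 h.2.1 h.2.2 g1.1 g1.2.1 g1.2.2).symm)]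
      exact List.map_congr_left (fun h _ => by simp [pvCmdA, pvCmdB, pvLookA, pvLookB])
  · congr 1
    funext g1
    rw [pvBucket_getD, List.filter_filter,
        List.filter_congr (fun h _ => (pvCondArch h.1 h.2.1 h.2.2 g1.1 g1.2.1 g1.2.2).symm)]
    exact List.map_congr_left (fun h _ => by simp [pvCmdA, pvCmdB, pvLookA, pvLookB])
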